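-- pv_equiv track=rewrite | github.com/Dina-Alswailem/Secret-Key-Encryption | vigenere.py | generate_encryption_key
-- ===== SOURCE A (Python) =====
-- def generate_encryption_key(plaintext, keyword):
--     keyword = list(keyword.upper())
--     keyword_length = len(keyword)
--     if len(plaintext) == keyword_length:
--         return keyword
--     else:
--         extended_keyword = [keyword[i % keyword_length] for i in range(len(plaintext))]
--         return ''.join(extended_keyword)
-- ===== SOURCE B (Python) =====
-- def generate_encryption_key(plaintext, keyword):
--     keyword = keyword.upper()
--     repeat = len(plaintext) // len(keyword) + 1
--     return (keyword * repeat)[:len(plaintext)]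
-- ===== Notes on version B (the rewrite author's own statement) =====
-- stated objective: idiomatic
-- what changed: B builds the cycled key by repeating the whole uppercased keyword block-wise and slicing to length, instead of A's per-index modulo comprehension; B also drops A's equal-length special case, which in A returns a list of characters instead of a string. Pre_ excludes the empty keyword (A raises ZeroDivisionError) and equal-length inputs (A returns a Python list, not a str, there).
-- outside the precondition, e.g. on generate_encryption_key('AB', 'xy'): A returns ['X', 'Y'], B returns 'XY'; on generate_encryption_key('', ''): A returns [], B raises ZeroDivisionError
import Mathlib
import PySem

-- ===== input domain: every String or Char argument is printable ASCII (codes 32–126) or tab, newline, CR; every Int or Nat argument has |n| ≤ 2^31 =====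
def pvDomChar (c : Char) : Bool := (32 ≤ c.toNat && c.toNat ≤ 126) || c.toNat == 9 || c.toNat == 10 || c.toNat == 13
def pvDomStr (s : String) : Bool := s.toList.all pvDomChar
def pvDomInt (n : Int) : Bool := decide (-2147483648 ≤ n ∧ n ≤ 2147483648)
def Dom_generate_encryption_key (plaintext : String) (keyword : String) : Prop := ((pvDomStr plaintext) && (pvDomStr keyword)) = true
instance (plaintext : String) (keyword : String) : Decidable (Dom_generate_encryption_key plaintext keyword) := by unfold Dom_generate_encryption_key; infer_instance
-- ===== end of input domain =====

-- B: cycled key built by block repetition of the uppercased keyword plus a slice, instead of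
-- A's per-index modulo comprehension (idiomatic; A's list-returning equal-length branch and the
-- empty-keyword ZeroDivisionError case are outside Pre_).


-- ===== PORT A =====
-- keyword = list(keyword.upper()); if len(plaintext) == len(keyword): return keyword (a Python
-- LIST — outside Pre_) else ''.join(keyword[i % kl] for i in range(len(plaintext))).
-- kw.getD (i % kl) ' ' is exact for kl > 0 (i % kl is then in range); kl = 0 raises
-- ZeroDivisionError in Python and is outside Pre_.
def generate_encryption_key (plaintext : String) (keyword : String) : String :=
  let kw : List Char := PySem.Chars.upper keyword.toList
  let kl : Nat := kw.length
  if plaintext.toList.length = kl then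
    String.ofList kw
  else
    String.ofList ((List.range plaintext.toList.length).map (fun i => kw.getD (i % kl) ' '))

-- ===== PORT B =====
-- keyword = keyword.upper(); repeat = len(plaintext) // len(keyword) + 1;
-- return (keyword * repeat)[:len(plaintext)].  Nat '/' matches Python '//' on these nonnegative
-- lengths for kl > 0; kl = 0 raises ZeroDivisionError in Python and is outside Pre_.
def generate_encryption_key_alt (plaintext : String) (keyword : String) : String :=
  let kw : List Char := PySem.Chars.upper keyword.toList
  let rep : Nat := plaintext.toList.length / kw.length + 1
  String.ofList (List.take plaintext.toList.length (List.replicate rep kw).flatten)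

-- ===== PRECONDITION & SPEC =====
-- Pre_ excludes (i) the empty keyword, where A raises ZeroDivisionError (and B too), and
-- (ii) equal-length inputs, where A returns a Python LIST of characters — not a value of the
-- declared str type — while B returns the corresponding string.
def Pre_generate_encryption_key (plaintext : String) (keyword : String) : Prop :=
  keyword.toList ≠ [] ∧ plaintext.toList.length ≠ keyword.toList.length
instance (plaintext : String) (keyword : String) : Decidable (Pre_generate_encryption_key plaintext keyword) := by unfold Pre_generate_encryption_key; infer_instance
def pvWitness_generate_encryption_key : String × String := ("HELLO", "key")

def Spec_generate_encryption_key (plaintext : String) (keyword : String) (out : String) : Prop := out = generate_encryption_key_alt plaintext keyword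
instance (plaintext : String) (keyword : String) (out : String) : Decidable (Spec_generate_encryption_key plaintext keyword out) := by unfold Spec_generate_encryption_key; infer_instance

-- ===== CLAIM (what is proved, stated in full; the proofs are below) =====
def Claim_equal_generate_encryption_key : Prop := ∀ (plaintext : String) (keyword : String), Dom_generate_encryption_key plaintext keyword → Pre_generate_encryption_key plaintext keyword → Spec_generate_encryption_key plaintext keyword (generate_encryption_key plaintext keyword)

-- ===== LEMMAS AND PROOFS =====

-- upper is a character map, so it preserves length.
theorem pv_length_upper (l : List Char) : (PySem.Chars.upper l).length = l.length := by
  simp [PySem.Chars.upper]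

-- flatten of m copies of l, written as one indexed map with cyclic indices.
theorem pv_flatten_replicate_eq_map (l : List Char) (m : Nat) :
    (List.replicate m l).flatten =
      (List.range (m * l.length)).map (fun i => l.getD (i % l.length) ' ') := by
  induction m with
  | zero => simp
  | succ m ih =>
    rcases eq_or_ne l.length 0 with h0 | h0
    · simp [List.length_eq_zero_iff.mp h0]
    · have : (m + 1) * l.length = l.length + m * l.length := by ring
      rw [List.replicate_succ, List.flatten_cons, this, List.range_add, List.map_append, ih]
      congr 1
      · apply List.ext_getElem
        · simp
        · intro i h1 h2
          simp at h2
          simp [List.getD_eq_getElem?_getD, Nat.mod_eq_of_lt h2, List.getElem?_eq_getElem h2]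
      · rw [List.map_map]
        apply List.map_congr_left
        intro i _
        simp [Nat.add_comm]

-- ===== VERDICT (by name: the statement is the Claim_ definition above) =====
theorem generate_encryption_key_spec : Claim_equal_generate_encryption_key := by
  intro plaintext keyword _ hpre
  obtain ⟨hk, hne⟩ := hpre
  unfold Spec_generate_encryption_key generate_encryption_key generate_encryption_key_alt
  simp only []
  set kw : List Char := PySem.Chars.upper keyword.toList with hkw
  set n : Nat := plaintext.toList.length with hn
  have hlen : kw.length = keyword.toList.length := pv_length_upper _
  have hklpos : 0 < kw.length := by
    rw [hlen]; exact List.length_pos_of_ne_nil hk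
  have hif : ¬ (n = kw.length) := by rw [hlen]; exact hne
  rw [if_neg hif]
  have hle : n ≤ (n / kw.length + 1) * kw.length := by
    have := Nat.div_add_mod n kw.length
    have hmod : n % kw.length < kw.length := Nat.mod_lt _ hklpos
    nlinarith [Nat.div_add_mod n kw.length]
  rw [pv_flatten_replicate_eq_map, ← List.map_take, List.take_range, Nat.min_eq_left hle]
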